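-- pv_equiv track=rewrite | github.com/Seooooooogi/Coding_exercise | Union_Find/Implementation.py | solution
-- ===== SOURCE A (Python) =====
-- def find(x, parents):
--     # 현재 노드와 부모 노드가 동일하지 않을 경우 계속 부모 노드를 거슬러 올라감
--     if parents[x] != x:
--         parents[x] = find(parents[x], parents)
--     return parents[x]
--
-- def union_set(x, y, parents, rank_data):
--     root1 = find(x, parents)
--     root2 = find(y, parents)
--
--
--     if root1 != root2:
--         # 랭크가 큰 쪽으로 작은 쪽이 합쳐지는 형태로 연산
--         if rank_data[root1] < rank_data[root2]:
--             parents[root1] = root2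
--         elif rank_data[root1] > rank_data[root2]:
--             parents[root2] = root1
--         # 두 랭크가 동일한 경우 그냥 root1에 맞추고 root1의 랭크를 1 늘려줌
--         else:
--             parents[root2] = root1
--             rank_data[root1] += 1
--
-- def solution(k, operations):
--     parents = list(range(k))
--     rank_data = [0] * k
--     results = []
--
--     for op in operations:
--         if op[0] == "u":
--             x = int(op[1])
--             y = int(op[2])
--             union_set(x, y, parents, rank_data)
--         elif op[0] == "f":
--             x = int(op[1])
--             y = int(op[2])
--             results.append(find(x, parents) == find(y, parents))
--
--     return results
-- ===== SOURCE B (Python) =====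
-- def solution(k, operations):
--     # quick-find: labels[i] is the representative label of i's set;
--     # union relabels the whole class of one side, find is a single lookup
--     labels = list(range(k))
--     results = []
--     for op in operations:
--         if op[0] == "u":
--             a = labels[int(op[1])]
--             b = labels[int(op[2])]
--             if a != b:
--                 labels = [a if l == b else l for l in labels]
--         elif op[0] == "f":
--             results.append(labels[int(op[1])] == labels[int(op[2])])
--     return results
-- ===== Notes on version B (the rewrite author's own statement) =====
-- stated objective: simpler
-- what changed: Replaces the union-by-rank forest with recursive path-compressing find by a flat quick-find labelling: find is a single array lookup and union relabels the merged class in one comprehension, with no rank array and no recursion.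
import Mathlib
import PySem

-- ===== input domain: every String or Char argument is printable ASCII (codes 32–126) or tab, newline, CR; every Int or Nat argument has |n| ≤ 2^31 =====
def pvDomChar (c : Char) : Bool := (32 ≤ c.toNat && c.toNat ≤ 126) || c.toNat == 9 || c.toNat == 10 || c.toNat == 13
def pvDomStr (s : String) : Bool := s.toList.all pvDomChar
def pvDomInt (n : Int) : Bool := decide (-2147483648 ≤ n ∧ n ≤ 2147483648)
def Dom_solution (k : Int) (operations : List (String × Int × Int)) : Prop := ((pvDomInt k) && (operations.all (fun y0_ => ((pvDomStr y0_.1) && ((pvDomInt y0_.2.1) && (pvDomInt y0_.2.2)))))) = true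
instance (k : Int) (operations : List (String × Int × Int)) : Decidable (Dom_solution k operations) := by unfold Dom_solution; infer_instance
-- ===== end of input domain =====

-- B replaces A's union-by-rank forest with recursive path compression by a flat
-- quick-find labelling (find = one lookup, union = relabel one class); same results.
-- A mutates no caller-visible data (all lists are built inside solution).

-- shared thin indexing helper: Python's xs[i] read, total under the in-range Pre_
def pgetI (xs : List Int) (i : Int) : Int := (PySem.List.pyGet? xs i).getD 0

-- ===== PORT A =====
def findA : Nat → Int → List Int → Int × List Int
  | 0, x, ps => (pgetI ps x, ps)                    -- fuel guard only; unreachable under Pre_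
  | f+1, x, ps =>
    if pgetI ps x ≠ x then
      let t := findA f (pgetI ps x) ps
      let ps2 := PySem.List.pySetD t.2 x t.1        -- parents[x] = find(parents[x], parents)
      (pgetI ps2 x, ps2)                            -- return parents[x]
    else (pgetI ps x, ps)

def unionA (x y : Int) (ps rk : List Int) : List Int × List Int :=
  let t1 := findA ps.length x ps
  let t2 := findA t1.2.length y t1.2
  if t1.1 ≠ t2.1 then
    if pgetI rk t1.1 < pgetI rk t2.1 then (PySem.List.pySetD t2.2 t1.1 t2.1, rk)
    else if pgetI rk t2.1 < pgetI rk t1.1 then (PySem.List.pySetD t2.2 t2.1 t1.1, rk)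
    else (PySem.List.pySetD t2.2 t2.1 t1.1, PySem.List.pySetD rk t1.1 (pgetI rk t1.1 + 1))
  else (t2.2, rk)

def stepA (st : List Int × List Int × List Bool) (op : String × Int × Int) :
    List Int × List Int × List Bool :=
  if op.1 = "u" then
    let pr := unionA op.2.1 op.2.2 st.1 st.2.1
    (pr.1, pr.2, st.2.2)
  else if op.1 = "f" then
    let t1 := findA st.1.length op.2.1 st.1
    let t2 := findA t1.2.length op.2.2 t1.2
    (t2.2, st.2.1, st.2.2 ++ [decide (t1.1 = t2.1)])
  else st

def solution (k : Int) (operations : List (String × Int × Int)) : List Bool :=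
  (operations.foldl stepA (PySem.List.pyRange 0 k 1, List.replicate k.toNat 0, [])).2.2

-- ===== PORT B =====
def stepB (st : List Int × List Bool) (op : String × Int × Int) : List Int × List Bool :=
  if op.1 = "u" then
    let a := pgetI st.1 op.2.1
    let b := pgetI st.1 op.2.2
    if a ≠ b then (st.1.map (fun l => if l = b then a else l), st.2) else st
  else if op.1 = "f" then
    (st.1, st.2 ++ [decide (pgetI st.1 op.2.1 = pgetI st.1 op.2.2)])
  else st

def solution_alt (k : Int) (operations : List (String × Int × Int)) : List Bool :=
  (operations.foldl stepB (PySem.List.pyRange 0 k 1, [])).2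

-- ===== PRECONDITION & SPEC =====
-- Pre_ excludes exactly the inputs on which A raises IndexError: some executed
-- "u"/"f" operation carries an index outside [-k, k). (Negative in-range indices
-- are INCLUDED: Python wraps them, and both programs return there.)
def Pre_solution (k : Int) (operations : List (String × Int × Int)) : Prop :=
  ∀ t ∈ operations, (t.1 = "u" ∨ t.1 = "f") →
    (-k ≤ t.2.1 ∧ t.2.1 < k ∧ -k ≤ t.2.2 ∧ t.2.2 < k)
instance (k : Int) (operations : List (String × Int × Int)) : Decidable (Pre_solution k operations) := by
  unfold Pre_solution; infer_instance

def pvWitness_solution : Int × (List (String × Int × Int)) :=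
  (3, [("u", 0, 1), ("f", 1, -3), ("nop", 99, 99)])

def Spec_solution (k : Int) (operations : List (String × Int × Int)) (out : List Bool) : Prop := out = solution_alt k operations
instance (k : Int) (operations : List (String × Int × Int)) (out : List Bool) : Decidable (Spec_solution k operations out) := by unfold Spec_solution; infer_instance

-- ===== CLAIM (what is proved, stated in full; the proofs are below) =====
def Claim_equal_solution : Prop := ∀ (k : Int) (operations : List (String × Int × Int)), Dom_solution k operations → Pre_solution k operations → Spec_solution k operations (solution k operations)

-- ===== LEMMAS AND PROOFS =====

-- x reaches its root r in exactly n parent steps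
inductive RootN (ps : List Int) : Int → Nat → Int → Prop
  | root {x : Int} : pgetI ps x = x → RootN ps x 0 x
  | step {x : Int} {n : Nat} {r : Int} :
      pgetI ps x ≠ x → RootN ps (pgetI ps x) n r → RootN ps x (n+1) r

def RootOf (ps : List Int) (x r : Int) : Prop := ∃ n, RootN ps x n r

def Bnd (ps : List Int) : Prop :=
  ∀ i : Int, 0 ≤ i → i < ps.length → 0 ≤ pgetI ps i ∧ pgetI ps i < ps.length

def Tot (ps : List Int) : Prop :=
  ∀ i : Int, 0 ≤ i → i < ps.length → ∃ r, RootOf ps i r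

def Sim (ps labels : List Int) : Prop :=
  ps.length = labels.length ∧
  ∀ x y : Int, 0 ≤ x → x < ps.length → 0 ≤ y → y < ps.length →
    ((∃ r, RootOf ps x r ∧ RootOf ps y r) ↔ pgetI labels x = pgetI labels y)
-- ---- basic indexing facts ----
theorem pget_eq (xs : List Int) (i : Int) (h1 : 0 ≤ i) (h2 : i < xs.length) :
    pgetI xs i = xs[i.toNat]'(by omega) :=
  PySem.List.pyGetD_eq_getElem xs 0 h1 h2

def wrapL (L : Nat) (x : Int) : Int := if x < 0 then x + L else x

theorem wrap_bounds (L : Nat) (x : Int) (h1 : -(L:Int) ≤ x) (h2 : x < L) :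
    0 ≤ wrapL L x ∧ wrapL L x < L := by
  unfold wrapL; split_ifs <;> omega

theorem wrap_nonneg (L : Nat) (x : Int) (hx : 0 ≤ x) : wrapL L x = x := by
  unfold wrapL; split_ifs <;> omega

theorem pget_wrap (xs : List Int) (x : Int) (h1 : -(xs.length:Int) ≤ x) (h2 : x < xs.length) :
    pgetI xs x = pgetI xs (wrapL xs.length x) := by
  unfold wrapL
  split_ifs with hx
  · simp only [pgetI, PySem.List.pyGet?, PySem.List.pyIdx?]
    split_ifs <;> try omega
    have he : (xs.length - (-x).toNat) = (x + xs.length).toNat := by omega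
    rw [he]
  · rfl

theorem pset_wrap (xs : List Int) (x v : Int) (h1 : -(xs.length:Int) ≤ x) (h2 : x < xs.length) :
    PySem.List.pySetD xs x v = xs.set (wrapL xs.length x).toNat v := by
  unfold wrapL
  split_ifs with hx
  · simp only [PySem.List.pySetD, PySem.List.pySet?, PySem.List.pyIdx?]
    split_ifs <;> try omega
    have he : (xs.length - (-x).toNat) = (x + xs.length).toNat := by omega
    rw [he]; rfl
  · exact PySem.List.pySetD_of_nonneg xs v (by omega)

theorem pget_set (xs : List Int) (j i v : Int) (hj1 : 0 ≤ j) (_hj2 : j < xs.length)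
    (hi1 : 0 ≤ i) (hi2 : i < xs.length) :
    pgetI (xs.set j.toNat v) i = if i = j then v else pgetI xs i := by
  rw [pget_eq _ i hi1 (by simpa using hi2), pget_eq xs i hi1 hi2]
  rw [List.getElem_set]
  by_cases hij : i = j
  · simp [hij]
  · have hne : ¬ (j.toNat = i.toNat) := by omega
    simp [hne, hij]

theorem pget_map (xs : List Int) (f : Int → Int) (i : Int) (h1 : 0 ≤ i) (h2 : i < xs.length) :
    pgetI (xs.map f) i = f (pgetI xs i) := by
  rw [pget_eq _ i h1 (by simpa using h2), pget_eq xs i h1 h2, List.getElem_map]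

-- ---- RootN basics ----
theorem rootN_fix {ps : List Int} {x : Int} {n : Nat} {r : Int} (h : RootN ps x n r) :
    pgetI ps r = r := by
  induction h with
  | root h => exact h
  | step h1 h2 ih => exact ih

theorem rootN_unique {ps : List Int} {x : Int} {n m : Nat} {r s : Int}
    (h1 : RootN ps x n r) (h2 : RootN ps x m s) : n = m ∧ r = s := by
  induction h1 generalizing m s with
  | root h =>
      cases h2 with
      | root h' => exact ⟨rfl, rfl⟩
      | step h' _ => exact absurd h h'
  | step h hr ih =>
      cases h2 with
      | root h' => exact absurd h' h
      | step h' hr' =>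
          obtain ⟨e1, e2⟩ := ih hr'
          exact ⟨by omega, e2⟩

theorem rootOf_unique {ps : List Int} {x r s : Int}
    (h1 : RootOf ps x r) (h2 : RootOf ps x s) : r = s := by
  obtain ⟨n, h1⟩ := h1; obtain ⟨m, h2⟩ := h2
  exact (rootN_unique h1 h2).2

theorem rootN_nonneg {ps : List Int} (hb : Bnd ps) {x : Int} {n : Nat} {r : Int}
    (h : RootN ps x n r) (hx1 : 0 ≤ x) (hx2 : x < ps.length) :
    0 ≤ r ∧ r < ps.length := by
  induction h with
  | root _ => exact ⟨hx1, hx2⟩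
  | @step x' n' r' h1 h2 ih => exact ih (hb x' hx1 hx2).1 (hb x' hx1 hx2).2

theorem rootOf_fix {ps : List Int} {r : Int} (h : pgetI ps r = r) : RootOf ps r r :=
  ⟨0, RootN.root h⟩

-- ---- pigeonhole: a chain of distinct in-range nodes is short ----
def chainL (ps : List Int) : Nat → Int → List Int
  | 0, x => [x]
  | n+1, x => x :: chainL ps n (pgetI ps x)

theorem chain_length (ps : List Int) (n : Nat) (x : Int) : (chainL ps n x).length = n + 1 := by
  induction n generalizing x with
  | zero => rfl
  | succ n ih => simp [chainL, ih]

theorem chain_mem {ps : List Int} {x : Int} {n : Nat} {r : Int} (h : RootN ps x n r) :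
    ∀ y ∈ chainL ps n x, ∃ m, m ≤ n ∧ RootN ps y m r := by
  induction h with
  | @root x h =>
      intro y hy; simp only [chainL, List.mem_singleton] at hy; subst hy
      exact ⟨0, le_refl _, RootN.root h⟩
  | @step x n r h1 h2 ih =>
      intro y hy
      simp only [chainL, List.mem_cons] at hy
      rcases hy with hy | hy
      · subst hy; exact ⟨n+1, le_refl _, RootN.step h1 h2⟩
      · obtain ⟨m, hm, hr⟩ := ih y hy
        exact ⟨m, by omega, hr⟩

theorem chain_nodup {ps : List Int} {x : Int} {n : Nat} {r : Int} (h : RootN ps x n r) :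
    (chainL ps n x).Nodup := by
  induction h with
  | root h => simp [chainL]
  | @step x n r h1 h2 ih =>
      simp only [chainL, List.nodup_cons]
      refine ⟨?_, ih⟩
      intro hmem
      obtain ⟨m, hm, hr⟩ := chain_mem h2 x hmem
      have := rootN_unique (RootN.step h1 h2) hr
      omega

theorem chain_range {ps : List Int} (hb : Bnd ps) {x : Int} {n : Nat} {r : Int}
    (h : RootN ps x n r) (hx1 : 0 ≤ x) (hx2 : x < ps.length) :
    ∀ y ∈ chainL ps n x, 0 ≤ y ∧ y < ps.length := by
  induction h with
  | root h =>
      intro y hy; simp only [chainL, List.mem_singleton] at hy; subst hy; exact ⟨hx1, hx2⟩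
  | @step x' n' r' h1 h2 ih =>
      intro y hy
      simp only [chainL, List.mem_cons] at hy
      rcases hy with hy | hy
      · subst hy; exact ⟨hx1, hx2⟩
      · exact ih (hb x' hx1 hx2).1 (hb x' hx1 hx2).2 y hy

theorem rootN_lt {ps : List Int} (hb : Bnd ps) {x : Int} {n : Nat} {r : Int}
    (h : RootN ps x n r) (hx1 : 0 ≤ x) (hx2 : x < ps.length) : n < ps.length := by
  have hcard : (chainL ps n x).toFinset.card = n + 1 := by
    rw [List.toFinset_card_of_nodup (chain_nodup h), chain_length]
  have hsub2 : (chainL ps n x).toFinset ⊆ Finset.Ico (0:Int) ps.length := by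
    intro y hy
    have := chain_range hb h hx1 hx2 y (List.mem_toFinset.mp hy)
    simp only [Finset.mem_Ico]; omega
  have hle := Finset.card_le_card hsub2
  rw [hcard] at hle
  simp only [Int.card_Ico] at hle
  omega

-- ---- a wrapped (negative) index reaches the same root ----
theorem rootOf_wrap {ps : List Int} (hb : Bnd ps) {x : Int}
    (h1 : -(ps.length:Int) ≤ x) (h2 : x < ps.length) {r : Int} :
    RootOf ps x r ↔ RootOf ps (wrapL ps.length x) r := by
  by_cases hx : 0 ≤ x
  · rw [wrap_nonneg _ _ hx]
  · have hpg : pgetI ps x = pgetI ps (wrapL ps.length x) := pget_wrap ps x h1 h2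
    have hwb : 0 ≤ wrapL ps.length x ∧ wrapL ps.length x < ps.length := wrap_bounds _ x h1 h2
    generalize hwdef : wrapL ps.length x = w at hpg hwb ⊢
    have hpw : 0 ≤ pgetI ps w ∧ pgetI ps w < ps.length := hb w hwb.1 hwb.2
    constructor
    · rintro ⟨n, hn⟩
      cases hn with
      | root h => rw [hpg] at h; omega
      | step hne hr =>
          rw [hpg] at hr
          by_cases hroot : pgetI ps w = w
          · rw [hroot] at hr; exact ⟨_, hr⟩
          · exact ⟨_, RootN.step hroot hr⟩
    · rintro ⟨n, hn⟩
      cases hn with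
      | root h =>
          refine ⟨1, RootN.step ?_ ?_⟩
          · rw [hpg, h]; omega
          · rw [hpg, h]; exact RootN.root h
      | step hne hr =>
          exact ⟨_, RootN.step (by rw [hpg]; omega) (by rw [hpg]; exact hr)⟩

theorem exists_rootN_le {ps : List Int} (hb : Bnd ps) (ht : Tot ps) {x : Int}
    (h1 : -(ps.length:Int) ≤ x) (h2 : x < ps.length) :
    ∃ n r, RootN ps x n r ∧ n ≤ ps.length ∧ 0 ≤ r ∧ r < ps.length ∧
      RootOf ps (wrapL ps.length x) r := by
  have hwb := wrap_bounds ps.length x h1 h2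
  obtain ⟨r, m, hm⟩ := ht _ hwb.1 hwb.2
  have hrb := rootN_nonneg hb hm hwb.1 hwb.2
  obtain ⟨n, hn⟩ := (rootOf_wrap hb h1 h2).mpr ⟨m, hm⟩
  refine ⟨n, r, hn, ?_, hrb.1, hrb.2, ⟨m, hm⟩⟩
  by_cases hx : 0 ≤ x
  · have := rootN_lt hb hn hx h2
    omega
  · have hpg : pgetI ps x = pgetI ps (wrapL ps.length x) := pget_wrap ps x h1 h2
    have hpw := hb _ hwb.1 hwb.2
    cases hn with
    | root h => rw [hpg] at h; omega
    | step hne hr =>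
        rw [hpg] at hr
        have := rootN_lt hb hr hpw.1 hpw.2
        omega

-- in-range read lands in range
theorem bnd_read {ps : List Int} (hb : Bnd ps) {x : Int}
    (h1 : -(ps.length:Int) ≤ x) (h2 : x < ps.length) :
    0 ≤ pgetI ps x ∧ pgetI ps x < ps.length := by
  rw [pget_wrap ps x h1 h2]
  have hwb := wrap_bounds ps.length x h1 h2
  exact hb _ hwb.1 hwb.2

-- ---- updates ----
theorem bnd_set {ps : List Int} (hb : Bnd ps) {j v : Int}
    (hj1 : 0 ≤ j) (hj2 : j < ps.length) (hv1 : 0 ≤ v) (hv2 : v < ps.length) :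
    Bnd (ps.set j.toNat v) := by
  intro i hi1 hi2
  rw [List.length_set] at hi2 ⊢
  rw [pget_set ps j i v hj1 hj2 hi1 hi2]
  split_ifs
  · exact ⟨hv1, hv2⟩
  · exact hb i hi1 hi2

-- path compression: pointing any node at its own root changes no root
theorem set_root_transfer {ps1 : List Int} (hb : Bnd ps1) {w r : Int}
    (hw1 : 0 ≤ w) (hw2 : w < ps1.length) (hr : RootOf ps1 w r) :
    ∀ y n s, RootN ps1 y n s → 0 ≤ y → y < ps1.length →
      RootOf (ps1.set w.toNat r) y s := by
  have hrfix : pgetI ps1 r = r := by obtain ⟨n, hn⟩ := hr; exact rootN_fix hn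
  have hrb : 0 ≤ r ∧ r < ps1.length := by
    obtain ⟨n, hn⟩ := hr; exact rootN_nonneg hb hn hw1 hw2
  intro y n s hn
  induction hn with
  | @root y0 h =>
      intro hy1 hy2
      by_cases hyw : y0 = w
      · subst hyw
        have hry : r = y0 := rootOf_unique hr (rootOf_fix h)
        exact rootOf_fix (by rw [pget_set ps1 y0 y0 r hy1 hy2 hy1 hy2]; simp [hry])
      · exact rootOf_fix (by rw [pget_set ps1 w y0 r hw1 hw2 hy1 hy2]; simp [hyw, h])
  | @step y0 n0 s0 hne hn0 ih =>
      intro hy1 hy2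
      by_cases hyw : y0 = w
      · subst hyw
        have hsr : s0 = r := rootOf_unique ⟨n0+1, RootN.step hne hn0⟩ hr
        subst hsr
        have hrw : s0 ≠ y0 := by
          intro h; rw [h] at hrfix; exact hne hrfix
        have hg1 : pgetI (ps1.set y0.toNat s0) y0 = s0 := by
          rw [pget_set ps1 y0 y0 s0 hy1 hy2 hy1 hy2]; simp
        have hg2 : pgetI (ps1.set y0.toNat s0) s0 = s0 := by
          rw [pget_set ps1 y0 s0 s0 hy1 hy2 hrb.1 hrb.2]
          split_ifs with hc
          · rfl
          · exact hrfix
        refine ⟨1, RootN.step ?_ ?_⟩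
        · rw [hg1]; exact hrw
        · rw [hg1]; exact RootN.root hg2
      · have hpb := hb y0 hy1 hy2
        obtain ⟨m2, hm2⟩ := ih hpb.1 hpb.2
        refine ⟨m2 + 1, RootN.step ?_ ?_⟩
        · rw [pget_set ps1 w y0 r hw1 hw2 hy1 hy2]; simp [hyw, hne]
        · rw [pget_set ps1 w y0 r hw1 hw2 hy1 hy2]
          simp only [if_neg hyw]
          exact hm2

-- linking root rl under root rw: every root rl becomes rw, others unchanged
theorem link_transfer {ps2 : List Int} (hb : Bnd ps2) {rl rw : Int}
    (hl1 : 0 ≤ rl) (hl2 : rl < ps2.length) (hw1 : 0 ≤ rw) (hw2 : rw < ps2.length)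
    (hlf : pgetI ps2 rl = rl) (hwf : pgetI ps2 rw = rw) (hne : rl ≠ rw) :
    ∀ y n s, RootN ps2 y n s → 0 ≤ y → y < ps2.length →
      RootOf (ps2.set rl.toNat rw) y (if s = rl then rw else s) := by
  intro y n s hn
  induction hn with
  | @root y0 h =>
      intro hy1 hy2
      by_cases hyl : y0 = rl
      · subst hyl
        rw [if_pos rfl]
        have hg1 : pgetI (ps2.set y0.toNat rw) y0 = rw := by
          rw [pget_set ps2 y0 y0 rw hy1 hy2 hy1 hy2]; simp
        have hg2 : pgetI (ps2.set y0.toNat rw) rw = rw := by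
          rw [pget_set ps2 y0 rw rw hy1 hy2 hw1 hw2]
          simp [Ne.symm hne, hwf]
        refine ⟨1, RootN.step ?_ ?_⟩
        · rw [hg1]; exact Ne.symm hne
        · rw [hg1]; exact RootN.root hg2
      · rw [if_neg hyl]
        exact rootOf_fix (by rw [pget_set ps2 rl y0 rw hl1 hl2 hy1 hy2]; simp [hyl, h])
  | @step y0 n0 s0 hstep hn0 ih =>
      intro hy1 hy2
      have hyl : y0 ≠ rl := by
        intro h; rw [h] at hstep; exact hstep hlf
      have hpb := hb y0 hy1 hy2
      obtain ⟨m2, hm2⟩ := ih hpb.1 hpb.2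
      refine ⟨m2 + 1, RootN.step ?_ ?_⟩
      · rw [pget_set ps2 rl y0 rw hl1 hl2 hy1 hy2]; simp [hyl, hstep]
      · rw [pget_set ps2 rl y0 rw hl1 hl2 hy1 hy2]
        simp only [if_neg hyl]
        exact hm2

-- ---- preservation plumbing ----
theorem tot_of_transfer {ps ps' : List Int} (hlen : ps'.length = ps.length) (ht : Tot ps)
    (tr : ∀ (y s : Int), 0 ≤ y → y < ps.length → RootOf ps y s → RootOf ps' y s) : Tot ps' := by
  intro i hi1 hi2
  rw [hlen] at hi2
  obtain ⟨r, hr⟩ := ht i hi1 hi2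
  exact ⟨r, tr i r hi1 hi2 hr⟩

theorem sim_transfer {ps ps' labels : List Int} (hlen : ps'.length = ps.length)
    (ht : Tot ps)
    (tr : ∀ (y s : Int), 0 ≤ y → y < ps.length → RootOf ps y s → RootOf ps' y s)
    (hs : Sim ps labels) : Sim ps' labels := by
  obtain ⟨hsl, hsim⟩ := hs
  refine ⟨by omega, ?_⟩
  intro x y hx1 hx2 hy1 hy2
  rw [hlen] at hx2 hy2
  rw [← hsim x y hx1 hx2 hy1 hy2]
  constructor
  · rintro ⟨r, hx, hy⟩
    obtain ⟨rx, hrx⟩ := ht x hx1 hx2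
    obtain ⟨ry, hry⟩ := ht y hy1 hy2
    have ex : rx = r := rootOf_unique (tr x rx hx1 hx2 hrx) hx
    have ey : ry = r := rootOf_unique (tr y ry hy1 hy2 hry) hy
    exact ⟨r, ex ▸ hrx, ey ▸ hry⟩
  · rintro ⟨r, hx, hy⟩
    exact ⟨r, tr x r hx1 hx2 hx, tr y r hy1 hy2 hy⟩

-- ---- specification of A's recursive find ----
theorem findA_spec : ∀ (f : Nat) (ps : List Int) (x : Int) (n : Nat) (r : Int),
    Bnd ps → RootN ps x n r → n ≤ f → -(ps.length:Int) ≤ x → x < ps.length →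
    (findA f x ps).1 = r ∧ (findA f x ps).2.length = ps.length ∧ Bnd (findA f x ps).2 ∧
    (∀ (y s : Int), 0 ≤ y → y < ps.length → RootOf ps y s → RootOf (findA f x ps).2 y s) := by
  intro f
  induction f with
  | zero =>
      intro ps x n r hb hn hf hx1 hx2
      have hn0 : n = 0 := by omega
      subst hn0
      cases hn with
      | root h =>
          refine ⟨?_, rfl, hb, fun y s _ _ hy => hy⟩
          simpa [findA] using h
  | succ f ih =>
      intro ps x n r hb hn hf hx1 hx2
      cases hn with
      | root h =>
          have hT : findA (f+1) x ps = (pgetI ps x, ps) := by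
            simp [findA, h]
          rw [hT]
          exact ⟨h, rfl, hb, fun y s _ _ hy => hy⟩
      | @step _ n0 _ hne hn0 =>
          have hpxb := bnd_read hb hx1 hx2
          obtain ⟨ih1, ih2, ih3, ih4⟩ :=
            ih ps (pgetI ps x) n0 r hb hn0 (by omega) (by omega) hpxb.2
          have hwb := wrap_bounds ps.length x hx1 hx2
          have hRw : RootOf ps (wrapL ps.length x) r :=
            (rootOf_wrap hb hx1 hx2).mp ⟨n0+1, RootN.step hne hn0⟩
          have hRw2 : RootOf (findA f (pgetI ps x) ps).2 (wrapL ps.length x) r :=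
            ih4 _ r hwb.1 hwb.2 hRw
          have hrb : 0 ≤ r ∧ r < (ps.length:Int) := by
            obtain ⟨m, hm⟩ := hRw
            exact rootN_nonneg hb hm hwb.1 hwb.2
          have hT : findA (f+1) x ps =
              (pgetI (PySem.List.pySetD (findA f (pgetI ps x) ps).2 x
                        (findA f (pgetI ps x) ps).1) x,
               PySem.List.pySetD (findA f (pgetI ps x) ps).2 x (findA f (pgetI ps x) ps).1) := by
            simp only [findA]
            rw [if_pos hne]
          have hps2 : PySem.List.pySetD (findA f (pgetI ps x) ps).2 x (findA f (pgetI ps x) ps).1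
              = (findA f (pgetI ps x) ps).2.set (wrapL ps.length x).toNat r := by
            rw [pset_wrap _ x _ (by rw [ih2]; omega) (by rw [ih2]; omega), ih2, ih1]
          rw [hT, hps2]
          have hwb2 : 0 ≤ wrapL ps.length x ∧
              (wrapL ps.length x) < ((findA f (pgetI ps x) ps).2.length:Int) := by
            rw [ih2]; exact hwb
          have hlen3 : ((findA f (pgetI ps x) ps).2.set (wrapL ps.length x).toNat r).length
              = ps.length := by
            rw [List.length_set, ih2]
          refine ⟨?_, hlen3, ?_, ?_⟩
          · -- the returned value parents[x] is r
            have h1 : pgetI ((findA f (pgetI ps x) ps).2.set (wrapL ps.length x).toNat r) x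
                = pgetI ((findA f (pgetI ps x) ps).2.set (wrapL ps.length x).toNat r)
                    (wrapL ps.length x) := by
              have := pget_wrap ((findA f (pgetI ps x) ps).2.set (wrapL ps.length x).toNat r) x
                (by rw [hlen3]; omega) (by rw [hlen3]; omega)
              rwa [hlen3] at this
            rw [h1, pget_set _ _ _ _ hwb2.1 hwb2.2 hwb2.1 hwb2.2]
            simp
          · exact bnd_set ih3 hwb2.1 hwb2.2 (by omega) (by rw [ih2]; omega)
          · intro y s hy1 hy2 hy
            obtain ⟨m, hm⟩ := ih4 y s hy1 hy2 hy
            exact set_root_transfer ih3 hwb2.1 hwb2.2 hRw2 y m s hm hy1 (by rw [ih2]; omega)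

-- ---- the two find calls of a union/find operation ----
theorem findPair_spec (ps : List Int) (x y : Int) (hb : Bnd ps) (ht : Tot ps)
    (hx1 : -(ps.length:Int) ≤ x) (hx2 : x < ps.length)
    (hy1 : -(ps.length:Int) ≤ y) (hy2 : y < ps.length) :
    (findA (findA ps.length x ps).2.length y (findA ps.length x ps).2).2.length = ps.length ∧
    Bnd (findA (findA ps.length x ps).2.length y (findA ps.length x ps).2).2 ∧
    Tot (findA (findA ps.length x ps).2.length y (findA ps.length x ps).2).2 ∧
    (∀ (z s : Int), 0 ≤ z → z < ps.length → RootOf ps z s →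
      RootOf (findA (findA ps.length x ps).2.length y (findA ps.length x ps).2).2 z s) ∧
    RootOf ps (wrapL ps.length x) (findA ps.length x ps).1 ∧
    RootOf ps (wrapL ps.length y)
      (findA (findA ps.length x ps).2.length y (findA ps.length x ps).2).1 ∧
    (0 ≤ (findA ps.length x ps).1 ∧ (findA ps.length x ps).1 < ps.length) ∧
    (0 ≤ (findA (findA ps.length x ps).2.length y (findA ps.length x ps).2).1 ∧
      (findA (findA ps.length x ps).2.length y (findA ps.length x ps).2).1 < ps.length) ∧
    pgetI (findA (findA ps.length x ps).2.length y (findA ps.length x ps).2).2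
      (findA ps.length x ps).1 = (findA ps.length x ps).1 ∧
    pgetI (findA (findA ps.length x ps).2.length y (findA ps.length x ps).2).2
      (findA (findA ps.length x ps).2.length y (findA ps.length x ps).2).1
      = (findA (findA ps.length x ps).2.length y (findA ps.length x ps).2).1 := by
  obtain ⟨n1, r1, hn1, hle1, hr1a, hr1b, hRw1⟩ := exists_rootN_le hb ht hx1 hx2
  obtain ⟨f11, f12, f13, f14⟩ := findA_spec ps.length ps x n1 r1 hb hn1 hle1 hx1 hx2
  have ht1 : Tot (findA ps.length x ps).2 := tot_of_transfer f12 ht f14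
  obtain ⟨n2, r2, hn2, hle2, hr2a, hr2b, hRw2⟩ :=
    exists_rootN_le f13 ht1 (x := y) (by rw [f12]; omega) (by rw [f12]; omega)
  obtain ⟨f21, f22, f23, f24⟩ :=
    findA_spec (findA ps.length x ps).2.length (findA ps.length x ps).2 y n2 r2 f13 hn2
      hle2 (by omega) (by omega)
  have hlen2 : (findA (findA ps.length x ps).2.length y (findA ps.length x ps).2).2.length
      = ps.length := by rw [f22, f12]
  have hwy : wrapL (findA ps.length x ps).2.length y = wrapL ps.length y := by rw [f12]
  -- transfer from ps all the way to the final state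
  have htrans : ∀ (z s : Int), 0 ≤ z → z < ps.length → RootOf ps z s →
      RootOf (findA (findA ps.length x ps).2.length y (findA ps.length x ps).2).2 z s := by
    intro z s hz1 hz2 hz
    exact f24 z s hz1 (by rw [f12]; omega) (f14 z s hz1 hz2 hz)
  -- r2 is also y's root in the ORIGINAL ps
  have hRy : RootOf ps (wrapL ps.length y) r2 := by
    have hwby := wrap_bounds ps.length y hy1 hy2
    obtain ⟨r2', hr2'⟩ := ht _ hwby.1 hwby.2
    have : RootOf (findA ps.length x ps).2 (wrapL ps.length y) r2' :=
      f14 _ r2' hwby.1 hwby.2 hr2'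
    have he : r2' = r2 := rootOf_unique this (hwy ▸ hRw2)
    exact he ▸ hr2'
  rw [f11, f21]
  refine ⟨hlen2, f23, tot_of_transfer hlen2 ht htrans, htrans, hRw1, hRy,
    ⟨hr1a, hr1b⟩, ⟨hr2a, by rw [f12] at hr2b; exact hr2b⟩, ?_, ?_⟩
  · have hwbx := wrap_bounds ps.length x hx1 hx2
    obtain ⟨m, hm⟩ := htrans _ r1 hr1a hr1b
      (by obtain ⟨m0, hm0⟩ := hRw1; exact rootOf_fix (rootN_fix hm0))
    exact rootN_fix hm
  · obtain ⟨m, hm⟩ := htrans _ r2 hr2a (by rw [f12] at hr2b; exact hr2b)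
      (by obtain ⟨m0, hm0⟩ := hRy; exact rootOf_fix (rootN_fix hm0))
    exact rootN_fix hm

-- ---- simulation: quick-find labels match the forest's partition ----
theorem sim_bool {ps labels : List Int} (hs : Sim ps labels) {x y r1 r2 : Int}
    (hx1 : -(ps.length:Int) ≤ x) (hx2 : x < ps.length)
    (hy1 : -(ps.length:Int) ≤ y) (hy2 : y < ps.length)
    (hr1 : RootOf ps (wrapL ps.length x) r1) (hr2 : RootOf ps (wrapL ps.length y) r2) :
    (r1 = r2 ↔ pgetI labels x = pgetI labels y) := by
  obtain ⟨hsl, hsim⟩ := hs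
  have hwbx := wrap_bounds ps.length x hx1 hx2
  have hwby := wrap_bounds ps.length y hy1 hy2
  have hlx : pgetI labels x = pgetI labels (wrapL ps.length x) := by
    have := pget_wrap labels x (by rw [← hsl]; omega) (by rw [← hsl]; omega)
    rwa [← hsl] at this
  have hly : pgetI labels y = pgetI labels (wrapL ps.length y) := by
    have := pget_wrap labels y (by rw [← hsl]; omega) (by rw [← hsl]; omega)
    rwa [← hsl] at this
  rw [hlx, hly, ← hsim _ _ hwbx.1 hwbx.2 hwby.1 hwby.2]
  constructor
  · intro he
    exact ⟨r2, he ▸ hr1, hr2⟩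
  · rintro ⟨r, ha, hb⟩
    rw [rootOf_unique hr1 ha, rootOf_unique hr2 hb]

-- pure bridge: collapsing one pair of representatives on each side
theorem collapse_bridge {sz sw lz lw r1 r2 a b rl rw : Int}
    (hz1 : sz = r1 ↔ lz = a) (hz2 : sz = r2 ↔ lz = b)
    (hw1 : sw = r1 ↔ lw = a) (hw2 : sw = r2 ↔ lw = b)
    (hzw : sz = sw ↔ lz = lw)
    (hor : (rl = r1 ∧ rw = r2) ∨ (rl = r2 ∧ rw = r1)) :
    ((if sz = rl then rw else sz) = (if sw = rl then rw else sw)) ↔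
    ((if lz = b then a else lz) = (if lw = b then a else lw)) := by
  rcases hor with ⟨e1, e2⟩ | ⟨e1, e2⟩ <;> rw [e1, e2] <;> split_ifs <;> omega

theorem sim_link {ps2 labels : List Int} (hb2 : Bnd ps2) (ht2 : Tot ps2) (hs2 : Sim ps2 labels)
    {x y r1 r2 rl rw : Int}
    (hx1 : -(ps2.length:Int) ≤ x) (hx2 : x < ps2.length)
    (hy1 : -(ps2.length:Int) ≤ y) (hy2 : y < ps2.length)
    (hr1 : RootOf ps2 (wrapL ps2.length x) r1) (hr2 : RootOf ps2 (wrapL ps2.length y) r2)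
    (hne : r1 ≠ r2)
    (hor : (rl = r1 ∧ rw = r2) ∨ (rl = r2 ∧ rw = r1)) :
    Sim (ps2.set rl.toNat rw)
      (labels.map (fun l => if l = pgetI labels y then pgetI labels x else l)) := by
  obtain ⟨hsl, hsim⟩ := hs2
  have hwbx := wrap_bounds ps2.length x hx1 hx2
  have hwby := wrap_bounds ps2.length y hy1 hy2
  have hr1f : pgetI ps2 r1 = r1 := by obtain ⟨m, hm⟩ := hr1; exact rootN_fix hm
  have hr2f : pgetI ps2 r2 = r2 := by obtain ⟨m, hm⟩ := hr2; exact rootN_fix hm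
  have hr1b : 0 ≤ r1 ∧ r1 < (ps2.length:Int) := by
    obtain ⟨m, hm⟩ := hr1; exact rootN_nonneg hb2 hm hwbx.1 hwbx.2
  have hr2b : 0 ≤ r2 ∧ r2 < (ps2.length:Int) := by
    obtain ⟨m, hm⟩ := hr2; exact rootN_nonneg hb2 hm hwby.1 hwby.2
  have hlb : (0 ≤ rl ∧ rl < (ps2.length:Int)) ∧ (0 ≤ rw ∧ rw < (ps2.length:Int)) := by
    rcases hor with ⟨e1, e2⟩ | ⟨e1, e2⟩ <;> subst e1 <;> subst e2 <;> exact ⟨by assumption, by assumption⟩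
  have hlf : pgetI ps2 rl = rl := by
    rcases hor with ⟨e1, _⟩ | ⟨e1, _⟩ <;> subst e1 <;> assumption
  have hwf : pgetI ps2 rw = rw := by
    rcases hor with ⟨_, e2⟩ | ⟨_, e2⟩ <;> subst e2 <;> assumption
  have hlwne : rl ≠ rw := by
    rcases hor with ⟨e1, e2⟩ | ⟨e1, e2⟩ <;> subst e1 <;> subst e2 <;> omega
  have hlen3 : (ps2.set rl.toNat rw).length = ps2.length := by rw [List.length_set]
  refine ⟨by simp [hlen3, ← hsl], ?_⟩
  intro z w' hz1 hz2 hw1' hw2'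
  rw [hlen3] at hz2 hw2'
  obtain ⟨sz, hsz⟩ := ht2 z hz1 hz2
  obtain ⟨sw, hsw⟩ := ht2 w' hw1' hw2'
  -- labels are read through the map
  have hmz : pgetI (labels.map (fun l => if l = pgetI labels y then pgetI labels x else l)) z
      = (if pgetI labels z = pgetI labels y then pgetI labels x else pgetI labels z) :=
    pget_map labels _ z hz1 (by rw [← hsl]; omega)
  have hmw : pgetI (labels.map (fun l => if l = pgetI labels y then pgetI labels x else l)) w'
      = (if pgetI labels w' = pgetI labels y then pgetI labels x else pgetI labels w') :=
    pget_map labels _ w' hw1' (by rw [← hsl]; omega)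
  rw [hmz, hmw]
  -- roots after the link
  have hz3 : RootOf (ps2.set rl.toNat rw) z (if sz = rl then rw else sz) := by
    obtain ⟨m, hm⟩ := hsz
    exact link_transfer hb2 hlb.1.1 hlb.1.2 hlb.2.1 hlb.2.2 hlf hwf hlwne z m sz hm hz1 hz2
  have hw3 : RootOf (ps2.set rl.toNat rw) w' (if sw = rl then rw else sw) := by
    obtain ⟨m, hm⟩ := hsw
    exact link_transfer hb2 hlb.1.1 hlb.1.2 hlb.2.1 hlb.2.2 hlf hwf hlwne w' m sw hm hw1' hw2'
  have hLHS : (∃ r, RootOf (ps2.set rl.toNat rw) z r ∧ RootOf (ps2.set rl.toNat rw) w' r) ↔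
      (if sz = rl then rw else sz) = (if sw = rl then rw else sw) := by
    constructor
    · rintro ⟨r, ha, hb⟩
      rw [rootOf_unique hz3 ha, rootOf_unique hw3 hb]
    · intro he
      exact ⟨_, hz3, he ▸ hw3⟩
  rw [hLHS]
  -- the per-node class/label correspondences
  have key : ∀ (u su : Int), 0 ≤ u → u < (ps2.length:Int) → RootOf ps2 u su →
      ((su = r1 ↔ pgetI labels u = pgetI labels x) ∧
       (su = r2 ↔ pgetI labels u = pgetI labels y)) := by
    intro u su hu1 hu2 hsu
    have hlu : pgetI labels x = pgetI labels (wrapL ps2.length x) := by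
      have := pget_wrap labels x (by rw [← hsl]; omega) (by rw [← hsl]; omega)
      rwa [← hsl] at this
    have hlv : pgetI labels y = pgetI labels (wrapL ps2.length y) := by
      have := pget_wrap labels y (by rw [← hsl]; omega) (by rw [← hsl]; omega)
      rwa [← hsl] at this
    constructor
    · rw [hlu, ← hsim u _ hu1 hu2 hwbx.1 hwbx.2]
      constructor
      · intro he; exact ⟨r1, he ▸ hsu, hr1⟩
      · rintro ⟨r, ha, hb⟩
        rw [rootOf_unique hsu ha, rootOf_unique hr1 hb]
    · rw [hlv, ← hsim u _ hu1 hu2 hwby.1 hwby.2]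
      constructor
      · intro he; exact ⟨r2, he ▸ hsu, hr2⟩
      · rintro ⟨r, ha, hb⟩
        rw [rootOf_unique hsu ha, rootOf_unique hr2 hb]
  obtain ⟨kz1, kz2⟩ := key z sz hz1 hz2 hsz
  obtain ⟨kw1, kw2⟩ := key w' sw hw1' hw2' hsw
  exact collapse_bridge kz1 kz2 kw1 kw2
    (by rw [← hsim z w' hz1 hz2 hw1' hw2']
        constructor
        · intro he; exact ⟨sw, he ▸ hsz, hsw⟩
        · rintro ⟨r, ha, hb⟩; rw [rootOf_unique hsz ha, rootOf_unique hsw hb])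
    hor

-- ---- the operation loop ----
theorem loop : ∀ (ops : List (String × Int × Int)) (ps rk labels : List Int) (res : List Bool),
    Bnd ps → Tot ps → Sim ps labels →
    (∀ t ∈ ops, (t.1 = "u" ∨ t.1 = "f") →
      (-(ps.length:Int) ≤ t.2.1 ∧ t.2.1 < ps.length ∧
       -(ps.length:Int) ≤ t.2.2 ∧ t.2.2 < ps.length)) →
    (ops.foldl stepA (ps, rk, res)).2.2 = (ops.foldl stepB (labels, res)).2 := by
  intro ops
  induction ops with
  | nil => intro ps rk labels res _ _ hs _; rfl
  | cons op ops ihops =>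
      intro ps rk labels res hb ht hs hpre
      have hpre' := fun t htm => hpre t (List.mem_cons_of_mem op htm)
      simp only [List.foldl_cons]
      by_cases hu : op.1 = "u"
      · -- union operation
        obtain ⟨hbx1, hbx2, hby1, hby2⟩ := hpre op List.mem_cons_self (Or.inl hu)
        obtain ⟨hlen2, hb2, ht2, htr, hRx, hRy, hr1b, hr2b, hfix1, hfix2⟩ :=
          findPair_spec ps op.2.1 op.2.2 hb ht hbx1 hbx2 hby1 hby2
        have hs2 : Sim (findA (findA ps.length op.2.1 ps).2.length op.2.2
            (findA ps.length op.2.1 ps).2).2 labels := sim_transfer hlen2 ht htr hs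
        have hiff := sim_bool hs hbx1 hbx2 hby1 hby2 hRx hRy
        have hA : stepA (ps, rk, res) op =
            ((unionA op.2.1 op.2.2 ps rk).1, (unionA op.2.1 op.2.2 ps rk).2, res) := by
          simp [stepA, hu]
        rw [hA]
        by_cases hr12 : (findA ps.length op.2.1 ps).1 =
            (findA (findA ps.length op.2.1 ps).2.length op.2.2 (findA ps.length op.2.1 ps).2).1
        · -- roots equal: nothing changes
          have hAu : unionA op.2.1 op.2.2 ps rk =
              ((findA (findA ps.length op.2.1 ps).2.length op.2.2
                 (findA ps.length op.2.1 ps).2).2, rk) := by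
            simp only [unionA]
            rw [if_neg (not_not_intro hr12)]
          have hB : stepB (labels, res) op = (labels, res) := by
            simp [stepB, hu, hiff.mp hr12]
          rw [hAu, hB]
          refine ihops _ rk labels res hb2 ht2 hs2 ?_
          intro t htm hc
          have hbd := hpre' t htm hc
          rw [hlen2]
          exact hbd
        · -- roots differ: A links one root under the other, B relabels b's class to a
          have hab : ¬ pgetI labels op.2.1 = pgetI labels op.2.2 := fun h => hr12 (hiff.mpr h)
          have hB : stepB (labels, res) op =
              (labels.map (fun l => if l = pgetI labels op.2.2 then pgetI labels op.2.1 else l),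
               res) := by
            simp [stepB, hu, hab]
          obtain ⟨rl, rwi, rk', hAu, hor⟩ :
              ∃ rl rwi rk', unionA op.2.1 op.2.2 ps rk = (PySem.List.pySetD
                (findA (findA ps.length op.2.1 ps).2.length op.2.2
                  (findA ps.length op.2.1 ps).2).2 rl rwi, rk') ∧
                ((rl = (findA ps.length op.2.1 ps).1 ∧
                  rwi = (findA (findA ps.length op.2.1 ps).2.length op.2.2
                    (findA ps.length op.2.1 ps).2).1) ∨
                 (rl = (findA (findA ps.length op.2.1 ps).2.length op.2.2
                    (findA ps.length op.2.1 ps).2).1 ∧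
                  rwi = (findA ps.length op.2.1 ps).1)) := by
            simp only [unionA]
            rw [if_pos hr12]
            split_ifs
            · exact ⟨_, _, _, rfl, Or.inl ⟨rfl, rfl⟩⟩
            · exact ⟨_, _, _, rfl, Or.inr ⟨rfl, rfl⟩⟩
            · exact ⟨_, _, _, rfl, Or.inr ⟨rfl, rfl⟩⟩
          have hlb : 0 ≤ rl ∧ rl < (ps.length:Int) := by
            rcases hor with ⟨e1, _⟩ | ⟨e1, _⟩ <;> rw [e1] <;> first | exact hr1b | exact hr2b
          have hwib : 0 ≤ rwi ∧ rwi < (ps.length:Int) := by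
            rcases hor with ⟨_, e2⟩ | ⟨_, e2⟩ <;> rw [e2] <;> first | exact hr1b | exact hr2b
          have hset : PySem.List.pySetD (findA (findA ps.length op.2.1 ps).2.length op.2.2
              (findA ps.length op.2.1 ps).2).2 rl rwi =
              (findA (findA ps.length op.2.1 ps).2.length op.2.2
                (findA ps.length op.2.1 ps).2).2.set rl.toNat rwi :=
            PySem.List.pySetD_of_nonneg _ rwi hlb.1
          rw [hAu, hB, hset]
          -- move the root facts into the post-find state ps2
          have hwx : wrapL (findA (findA ps.length op.2.1 ps).2.length op.2.2
              (findA ps.length op.2.1 ps).2).2.length op.2.1 = wrapL ps.length op.2.1 := by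
            rw [hlen2]
          have hwy : wrapL (findA (findA ps.length op.2.1 ps).2.length op.2.2
              (findA ps.length op.2.1 ps).2).2.length op.2.2 = wrapL ps.length op.2.2 := by
            rw [hlen2]
          have hwbx := wrap_bounds ps.length op.2.1 hbx1 hbx2
          have hwby := wrap_bounds ps.length op.2.2 hby1 hby2
          have hRx2 : RootOf (findA (findA ps.length op.2.1 ps).2.length op.2.2
              (findA ps.length op.2.1 ps).2).2 (wrapL ps.length op.2.1)
              (findA ps.length op.2.1 ps).1 := htr _ _ hwbx.1 hwbx.2 hRx
          have hRy2 : RootOf (findA (findA ps.length op.2.1 ps).2.length op.2.2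
              (findA ps.length op.2.1 ps).2).2 (wrapL ps.length op.2.2)
              (findA (findA ps.length op.2.1 ps).2.length op.2.2
                (findA ps.length op.2.1 ps).2).1 := htr _ _ hwby.1 hwby.2 hRy
          have hs3 : Sim ((findA (findA ps.length op.2.1 ps).2.length op.2.2
              (findA ps.length op.2.1 ps).2).2.set rl.toNat rwi)
              (labels.map (fun l => if l = pgetI labels op.2.2 then pgetI labels op.2.1 else l)) := by
            refine sim_link hb2 ht2 hs2 (x := op.2.1) (y := op.2.2)
              (by rw [hlen2]; omega) (by rw [hlen2]; omega)
              (by rw [hlen2]; omega) (by rw [hlen2]; omega) ?_ ?_ hr12 hor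
            · rw [hwx]; exact hRx2
            · rw [hwy]; exact hRy2
          have hb3 : Bnd ((findA (findA ps.length op.2.1 ps).2.length op.2.2
              (findA ps.length op.2.1 ps).2).2.set rl.toNat rwi) :=
            bnd_set hb2 hlb.1 (by rw [hlen2]; exact hlb.2) hwib.1 (by rw [hlen2]; exact hwib.2)
          have ht3 : Tot ((findA (findA ps.length op.2.1 ps).2.length op.2.2
              (findA ps.length op.2.1 ps).2).2.set rl.toNat rwi) := by
            intro i hi1 hi2
            rw [List.length_set] at hi2
            obtain ⟨s, m, hm⟩ := ht2 i hi1 hi2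
            refine ⟨_, link_transfer hb2 hlb.1 (by rw [hlen2]; exact hlb.2)
              hwib.1 (by rw [hlen2]; exact hwib.2) ?_ ?_ ?_ i m s hm hi1 hi2⟩
            · rcases hor with ⟨e1, _⟩ | ⟨e1, _⟩ <;> rw [e1] <;> assumption
            · rcases hor with ⟨_, e2⟩ | ⟨_, e2⟩ <;> rw [e2] <;> assumption
            · rcases hor with ⟨e1, e2⟩ | ⟨e1, e2⟩ <;> rw [e1, e2]
              · exact hr12
              · exact fun h => hr12 h.symm
          refine ihops _ rk' _ res hb3 ht3 hs3 ?_
          intro t htm hc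
          have hbd := hpre' t htm hc
          rw [List.length_set, hlen2]
          exact hbd
      · by_cases hf : op.1 = "f"
        · -- find query
          obtain ⟨hbx1, hbx2, hby1, hby2⟩ := hpre op List.mem_cons_self (Or.inr hf)
          obtain ⟨hlen2, hb2, ht2, htr, hRx, hRy, hr1b, hr2b, hfix1, hfix2⟩ :=
            findPair_spec ps op.2.1 op.2.2 hb ht hbx1 hbx2 hby1 hby2
          have hs2 : Sim (findA (findA ps.length op.2.1 ps).2.length op.2.2
              (findA ps.length op.2.1 ps).2).2 labels := sim_transfer hlen2 ht htr hs
          have hiff := sim_bool hs hbx1 hbx2 hby1 hby2 hRx hRy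
          have hA : stepA (ps, rk, res) op =
              ((findA (findA ps.length op.2.1 ps).2.length op.2.2
                 (findA ps.length op.2.1 ps).2).2, rk,
               res ++ [decide ((findA ps.length op.2.1 ps).1 =
                 (findA (findA ps.length op.2.1 ps).2.length op.2.2
                   (findA ps.length op.2.1 ps).2).1)]) := by
            simp [stepA, hu, hf]
          have hB : stepB (labels, res) op =
              (labels, res ++ [decide (pgetI labels op.2.1 = pgetI labels op.2.2)]) := by
            simp [stepB, hu, hf]
          have hdec : decide ((findA ps.length op.2.1 ps).1 =
              (findA (findA ps.length op.2.1 ps).2.length op.2.2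
                (findA ps.length op.2.1 ps).2).1)
              = decide (pgetI labels op.2.1 = pgetI labels op.2.2) :=
            decide_eq_decide.mpr hiff
          rw [hA, hB, hdec]
          refine ihops _ rk labels _ hb2 ht2 hs2 ?_
          intro t htm hc
          have hbd := hpre' t htm hc
          rw [hlen2]
          exact hbd
        · -- ignored operation
          have hA : stepA (ps, rk, res) op = (ps, rk, res) := by simp [stepA, hu, hf]
          have hB : stepB (labels, res) op = (labels, res) := by simp [stepB, hu, hf]
          rw [hA, hB]
          exact ihops ps rk labels res hb ht hs hpre'

-- ---- the initial identity state ----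
theorem pget_range (k i : Int) (h1 : 0 ≤ i) (h2 : i < (PySem.List.pyRange 0 k 1).length) :
    pgetI (PySem.List.pyRange 0 k 1) i = i := by
  rw [pget_eq _ i h1 h2, PySem.List.getElem_pyRange_one]
  omega

theorem bnd_range (k : Int) : Bnd (PySem.List.pyRange 0 k 1) := by
  intro i hi1 hi2
  rw [pget_range k i hi1 hi2]
  exact ⟨hi1, hi2⟩

theorem tot_range (k : Int) : Tot (PySem.List.pyRange 0 k 1) := by
  intro i hi1 hi2
  exact ⟨i, rootOf_fix (pget_range k i hi1 hi2)⟩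

theorem sim_range (k : Int) : Sim (PySem.List.pyRange 0 k 1) (PySem.List.pyRange 0 k 1) := by
  refine ⟨rfl, ?_⟩
  intro x y hx1 hx2 hy1 hy2
  rw [pget_range k x hx1 hx2, pget_range k y hy1 hy2]
  constructor
  · rintro ⟨r, ha, hb⟩
    rw [rootOf_unique (rootOf_fix (pget_range k x hx1 hx2)) ha,
        rootOf_unique (rootOf_fix (pget_range k y hy1 hy2)) hb]
  · intro he
    exact ⟨x, rootOf_fix (pget_range k x hx1 hx2), he ▸ rootOf_fix (pget_range k x hx1 hx2)⟩

-- ===== VERDICT (by name: the statement is the Claim_ definition above) =====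
theorem solution_spec : Claim_equal_solution := by
  intro k operations _hdom hpre
  show solution k operations = solution_alt k operations
  unfold solution solution_alt
  have hlen0 : ((PySem.List.pyRange 0 k 1).length : Int) = k.toNat := by
    rw [PySem.List.length_pyRange_one]
    omega
  refine loop operations _ _ _ [] (bnd_range k) (tot_range k) (sim_range k) ?_
  intro t htm hc
  have hbd := hpre t htm hc
  rw [hlen0]
  omega
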